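-- pv_equiv track=rewrite | github.com/AlbertoMussali/Ralphite | src/ralphite/engine/git_runtime_conflicts.py | parse_merge_blocked_files
-- ===== SOURCE A (Python) =====
-- def parse_merge_blocked_files(output: str) -> list[str]:
--     lines = output.splitlines()
--     files: list[str] = []
--     capture = False
--     for raw in lines:
--         line = raw.rstrip()
--         lowered = line.lower().strip()
--         if (
--             "would be overwritten by merge" in lowered
--             or "the following untracked working tree files would be overwritten by merge"
--             in lowered
--         ):
--             capture = True
--             continue
--         if not capture:
--             continue
--         stripped = line.strip()
--         if not stripped:
--             continue
--         if stripped.startswith("Please ") or stripped.startswith("Aborting"):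
--             break
--         files.append(stripped)
--     return sorted(dict.fromkeys(files))
-- ===== SOURCE B (Python) =====
-- def parse_merge_blocked_files(output: str) -> list[str]:
--     MARKER = "would be overwritten by merge"
--     lines = output.splitlines()
--     marked = [MARKER in l.strip().lower() for l in lines]
--     if True not in marked:
--         return []
--     tail = [l.strip() for l in lines[marked.index(True) + 1:]]
--     body = [s for s in tail if s and MARKER not in s.lower()]
--     stops = [s.startswith("Please ") or s.startswith("Aborting") for s in body]
--     kept = body[:stops.index(True)] if True in stops else body
--     return sorted(set(kept))
-- ===== Notes on version B (the rewrite author's own statement) =====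
-- stated objective: alternative
-- what changed: Replaces A's stateful capture-flag loop (with continue/break and an append accumulator) by a loop-free staged pipeline: a boolean marker mask with index(True), a slice, two comprehension stages, a stop mask with index(True) and a slice-truncation, then sorted(set(...)) instead of sorted(dict.fromkeys(...)).
import Mathlib
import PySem

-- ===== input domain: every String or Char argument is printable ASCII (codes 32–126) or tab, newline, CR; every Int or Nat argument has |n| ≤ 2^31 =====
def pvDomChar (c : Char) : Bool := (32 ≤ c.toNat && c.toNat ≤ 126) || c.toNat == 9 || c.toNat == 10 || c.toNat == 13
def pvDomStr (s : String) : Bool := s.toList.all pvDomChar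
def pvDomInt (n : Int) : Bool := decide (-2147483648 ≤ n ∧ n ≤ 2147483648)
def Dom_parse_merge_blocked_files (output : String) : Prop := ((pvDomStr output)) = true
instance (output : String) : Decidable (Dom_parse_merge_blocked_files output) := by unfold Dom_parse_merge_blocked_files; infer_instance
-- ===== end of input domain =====

-- B replaces A's capture-flag loop by a loop-free staged pipeline (masks, index, slices); same return value (objective: alternative).

-- ===== PORT A =====
def pvLoopA : List String → List String → Bool → List String
  | [], files, _ => files
  | raw :: rest, files, capture =>
    let line := PySem.Str.rstrip raw
    let lowered := PySem.Str.strip (PySem.Str.lower line)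
    if PySem.Str.isIn "would be overwritten by merge" lowered
        || PySem.Str.isIn "the following untracked working tree files would be overwritten by merge" lowered then
      pvLoopA rest files true
    else if capture = false then
      pvLoopA rest files capture
    else
      let stripped := PySem.Str.strip line
      if stripped = "" then pvLoopA rest files capture
      else if PySem.Str.startswith stripped "Please " || PySem.Str.startswith stripped "Aborting" then
        files
      else
        pvLoopA rest (files ++ [stripped]) capture

def parse_merge_blocked_files (output : String) : List String :=
  PySem.List.sorted (PySem.List.dedup (pvLoopA (PySem.Str.splitlines output) [] false)) (fun x => x) false

-- ===== PORT B =====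
def parse_merge_blocked_files_alt (output : String) : List String :=
  let MARKER := "would be overwritten by merge"
  let lines := PySem.Str.splitlines output
  let marked := lines.map (fun l => PySem.Str.isIn MARKER (PySem.Str.lower (PySem.Str.strip l)))
  match PySem.List.index? marked true with
  | none => []
  | some i =>
    -- lines[i+1:] with a nonnegative lower bound and no upper bound is List.drop
    let tail := (lines.drop (i + 1)).map PySem.Str.strip
    let body := tail.filter (fun s => !(s == "") && !(PySem.Str.isIn MARKER (PySem.Str.lower s)))
    let stops := body.map (fun s => PySem.Str.startswith s "Please " || PySem.Str.startswith s "Aborting")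
    let kept := match PySem.List.index? stops true with
      | none => body
      | some j => body.take j   -- body[:j] with a nonnegative upper bound is List.take
    PySem.List.sorted (PySem.Set.ofList kept) (fun x => x) false

-- ===== PRECONDITION & SPEC =====
def Spec_parse_merge_blocked_files (output : String) (out : List String) : Prop := out = parse_merge_blocked_files_alt output
instance (output : String) (out : List String) : Decidable (Spec_parse_merge_blocked_files output out) := by unfold Spec_parse_merge_blocked_files; infer_instance

-- ===== CLAIM =====
def Claim_equal_parse_merge_blocked_files : Prop := ∀ (output : String), Dom_parse_merge_blocked_files output → Spec_parse_merge_blocked_files output (parse_merge_blocked_files output)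

-- ===== LEMMAS AND PROOFS =====

theorem pv_rstrip_cons (c : Char) (t : List Char) :
    PySem.Chars.rstrip (c :: t) =
      if PySem.Chars.rstrip t = [] then (if PySem.Chars.isspace c then [] else [c])
      else c :: PySem.Chars.rstrip t := by
  simp only [PySem.Chars.rstrip, List.reverse_cons]
  cases h : List.dropWhile PySem.Chars.isspace t.reverse with
  | nil =>
    have hall : ∀ x ∈ t.reverse, PySem.Chars.isspace x = true := by
      simpa [List.dropWhile_eq_nil_iff] using h
    rw [List.dropWhile_append]
    simp [h, List.dropWhile]
    by_cases hc : PySem.Chars.isspace c <;> simp [hc]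
  | cons x xs =>
    rw [List.dropWhile_append]
    simp [h]

theorem pv_lstrip_rstrip (l : List Char) :
    PySem.Chars.lstrip (PySem.Chars.rstrip l) = PySem.Chars.rstrip (PySem.Chars.lstrip l) := by
  induction l with
  | nil => rfl
  | cons c t ih =>
    rw [pv_rstrip_cons]
    by_cases hc : PySem.Chars.isspace c
    · by_cases ht : PySem.Chars.rstrip t = []
      · have h1 : PySem.Chars.lstrip (c :: t) = PySem.Chars.lstrip t := by
          simp [PySem.Chars.lstrip, List.dropWhile, hc]
        rw [ht, h1, ← ih, ht]
        simp [hc]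
      · simp only [ht, if_false]
        have : PySem.Chars.lstrip (c :: PySem.Chars.rstrip t) = PySem.Chars.lstrip (PySem.Chars.rstrip t) := by
          simp [PySem.Chars.lstrip, List.dropWhile, hc]
        rw [this, ih]
        have : PySem.Chars.lstrip (c :: t) = PySem.Chars.lstrip t := by
          simp [PySem.Chars.lstrip, List.dropWhile, hc]
        rw [this]
    · have h1 : PySem.Chars.lstrip (c :: t) = c :: t := by
        simp [PySem.Chars.lstrip, List.dropWhile, hc]
      by_cases ht : PySem.Chars.rstrip t = []
      · simp [ht, hc, pv_rstrip_cons, PySem.Chars.lstrip, List.dropWhile]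
      · simp [ht, pv_rstrip_cons, PySem.Chars.lstrip, List.dropWhile, hc]

theorem pv_rstrip_idem (l : List Char) :
    PySem.Chars.rstrip (PySem.Chars.rstrip l) = PySem.Chars.rstrip l := by
  induction l with
  | nil => rfl
  | cons c t ih =>
    rw [pv_rstrip_cons]
    by_cases ht : PySem.Chars.rstrip t = []
    · rw [ht]
      by_cases hc : PySem.Chars.isspace c <;>
        simp [hc, PySem.Chars.rstrip]
    · simp [ht, pv_rstrip_cons, ih]

theorem pv_strip_rstrip (l : List Char) :
    PySem.Chars.strip (PySem.Chars.rstrip l) = PySem.Chars.strip l := by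
  simp [PySem.Chars.strip, pv_lstrip_rstrip, pv_rstrip_idem]

theorem pv_isspace_lowerChar (c : Char) :
    PySem.Chars.isspace (PySem.Chars.lowerChar c) = PySem.Chars.isspace c := by
  unfold PySem.Chars.lowerChar
  by_cases hu : PySem.Chars.isupper c = true
  · have hb : 65 ≤ c.toNat ∧ c.toNat ≤ 90 := by
      simpa [PySem.Chars.isupper] using hu
    have hv : (Char.ofNat (c.toNat + 32)).toNat = c.toNat + 32 := by
      rw [Char.toNat_ofNat, if_pos]
      unfold Nat.isValidChar
      left; omega
    rw [if_pos hu]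
    have h1 : PySem.Chars.isspace c = false := by
      simp only [PySem.Chars.isspace, Bool.or_eq_false_iff, Bool.and_eq_false_iff,
        decide_eq_false_iff_not]
      omega
    have h2 : PySem.Chars.isspace (Char.ofNat (c.toNat + 32)) = false := by
      simp only [PySem.Chars.isspace, hv, Bool.or_eq_false_iff, Bool.and_eq_false_iff,
        decide_eq_false_iff_not]
      omega
    rw [h1, h2]
  · simp [hu]

theorem pv_lower_lstrip (l : List Char) :
    PySem.Chars.lower (PySem.Chars.lstrip l) = PySem.Chars.lstrip (PySem.Chars.lower l) := by
  have hpq : (PySem.Chars.isspace ∘ PySem.Chars.lowerChar) = PySem.Chars.isspace := by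
    funext x; simp [pv_isspace_lowerChar]
  simp [PySem.Chars.lower, PySem.Chars.lstrip, List.dropWhile_map, hpq]

theorem pv_lower_rstrip (l : List Char) :
    PySem.Chars.lower (PySem.Chars.rstrip l) = PySem.Chars.rstrip (PySem.Chars.lower l) := by
  have hpq : (PySem.Chars.isspace ∘ PySem.Chars.lowerChar) = PySem.Chars.isspace := by
    funext x; simp [pv_isspace_lowerChar]
  simp [PySem.Chars.lower, PySem.Chars.rstrip, List.dropWhile_map, ← List.map_reverse, hpq]

theorem pv_lower_strip (l : List Char) :
    PySem.Chars.lower (PySem.Chars.strip l) = PySem.Chars.strip (PySem.Chars.lower l) := by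
  simp [PySem.Chars.strip, pv_lower_lstrip, pv_lower_rstrip]

-- A's per-line lowered value equals B's: strip(lower(rstrip l)) = lower(strip l)
theorem pv_lowered_eq (l : List Char) :
    PySem.Chars.strip (PySem.Chars.lower (PySem.Chars.rstrip l)) =
      PySem.Chars.lower (PySem.Chars.strip l) := by
  rw [pv_lower_rstrip, pv_strip_rstrip, ← pv_lower_strip]

theorem pvS_strip_rstrip (s : String) :
    PySem.Str.strip (PySem.Str.rstrip s) = PySem.Str.strip s := by
  simp [PySem.Str.strip, PySem.Str.rstrip, pv_strip_rstrip]

theorem pvS_lowered_eq (s : String) :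
    PySem.Str.strip (PySem.Str.lower (PySem.Str.rstrip s)) =
      PySem.Str.lower (PySem.Str.strip s) := by
  simp [PySem.Str.strip, PySem.Str.rstrip, PySem.Str.lower, pv_lowered_eq]

theorem pv_marker_collapse (l : String) :
    (PySem.Str.isIn "would be overwritten by merge" l
      || PySem.Str.isIn "the following untracked working tree files would be overwritten by merge" l)
      = PySem.Str.isIn "would be overwritten by merge" l := by
  cases h : PySem.Str.isIn "would be overwritten by merge" l with
  | true => simp
  | false =>
    simp only [Bool.false_or]
    cases h2 : PySem.Str.isIn "the following untracked working tree files would be overwritten by merge" l with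
    | false => rfl
    | true =>
      exfalso
      rw [PySem.Str.isIn_iff_infix] at h2
      have hsub : ("would be overwritten by merge".toList) <:+:
          ("the following untracked working tree files would be overwritten by merge".toList) := by
        decide
      have := hsub.trans h2
      rw [← PySem.Str.isIn_iff_infix] at this
      rw [h] at this
      exact Bool.false_ne_true this

-- B's tail-phase pipeline on a raw line list (proof-side abbreviation of B's staged code)
def pvKept (l : List String) : List String :=
  let body := (l.map PySem.Str.strip).filter
    (fun s => !(s == "") && !(PySem.Str.isIn "would be overwritten by merge" (PySem.Str.lower s)))
  match PySem.List.index?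
      (body.map (fun s => PySem.Str.startswith s "Please " || PySem.Str.startswith s "Aborting")) true with
  | none => body
  | some j => body.take j

theorem pv_capture (l : List String) : ∀ fs, pvLoopA l fs true = fs ++ pvKept l := by
  induction l with
  | nil => intro fs; simp [pvLoopA, pvKept]
  | cons raw rest ih =>
    intro fs
    rw [pvLoopA]
    simp only [pv_marker_collapse, pvS_lowered_eq, pvS_strip_rstrip]
    by_cases hm : PySem.Str.isIn "would be overwritten by merge"
        (PySem.Str.lower (PySem.Str.strip raw)) = true
    · rw [if_pos hm, ih]
      have hm2 := hm
      simp at hm2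
      have : pvKept (raw :: rest) = pvKept rest := by
        unfold pvKept
        simp [hm2]
      rw [this]
    · rw [if_neg hm, if_neg (by decide)]
      by_cases hs : PySem.Str.strip raw = ""
      · rw [if_pos hs, ih]
        have : pvKept (raw :: rest) = pvKept rest := by
          unfold pvKept
          simp [hs]
        rw [this]
      · rw [if_neg hs]
        have hm2 := hm
        simp at hm2
        have hfil : ((raw :: rest).map PySem.Str.strip).filter
            (fun s => !(s == "") && !(PySem.Str.isIn "would be overwritten by merge" (PySem.Str.lower s)))
            = PySem.Str.strip raw :: (rest.map PySem.Str.strip).filter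
              (fun s => !(s == "") && !(PySem.Str.isIn "would be overwritten by merge" (PySem.Str.lower s))) := by
          simp [hs, hm2]
        by_cases hp : (PySem.Str.startswith (PySem.Str.strip raw) "Please "
            || PySem.Str.startswith (PySem.Str.strip raw) "Aborting") = true
        · rw [if_pos hp]
          have : pvKept (raw :: rest) = [] := by
            unfold pvKept
            rw [hfil]
            simp only [List.map_cons, hp]
            rw [PySem.List.index?_cons_self]
            simp
          rw [this, List.append_nil]
        · rw [if_neg hp, ih]
          have : pvKept (raw :: rest) = PySem.Str.strip raw :: pvKept rest := by
            unfold pvKept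
            rw [hfil]
            simp only [List.map_cons]
            rw [PySem.List.index?_cons_of_ne _ (by simpa using hp)]
            cases PySem.List.index?
                ((List.filter (fun s => !(s == "") && !(PySem.Str.isIn "would be overwritten by merge" (PySem.Str.lower s)))
                  (List.map PySem.Str.strip rest)).map
                  (fun s => PySem.Str.startswith s "Please " || PySem.Str.startswith s "Aborting")) true with
            | none => simp
            | some j => simp [List.take_succ_cons]
          rw [this]
          simp
  
theorem pv_scan (lines : List String) :
    pvLoopA lines [] false =
      match PySem.List.index?
          (lines.map (fun l => PySem.Str.isIn "would be overwritten by merge"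
            (PySem.Str.lower (PySem.Str.strip l)))) true with
      | none => []
      | some i => pvKept (lines.drop (i + 1)) := by
  induction lines with
  | nil => rfl
  | cons raw rest ih =>
    rw [pvLoopA]
    simp only [pv_marker_collapse, pvS_lowered_eq, List.map_cons]
    by_cases hm : PySem.Str.isIn "would be overwritten by merge"
        (PySem.Str.lower (PySem.Str.strip raw)) = true
    · rw [if_pos hm, hm, PySem.List.index?_cons_self]
      simpa using pv_capture rest []
    · rw [if_neg hm, if_pos trivial, ih,
        PySem.List.index?_cons_of_ne _ (by simpa using hm)]
      cases PySem.List.index?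
          (rest.map (fun l => PySem.Str.isIn "would be overwritten by merge"
            (PySem.Str.lower (PySem.Str.strip l)))) true with
      | none => rfl
      | some i => simp

-- ===== VERDICT =====
theorem parse_merge_blocked_files_spec : Claim_equal_parse_merge_blocked_files := by
  intro output _
  unfold Spec_parse_merge_blocked_files parse_merge_blocked_files parse_merge_blocked_files_alt
  rw [pv_scan, PySem.List.dedup_eq_ofList]
  cases h : PySem.List.index?
      ((PySem.Str.splitlines output).map (fun l => PySem.Str.isIn "would be overwritten by merge"
        (PySem.Str.lower (PySem.Str.strip l)))) true with
  | none => simp only [h]; rfl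
  | some i =>
    simp only [h]
    unfold pvKept
    rfl
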